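-- pv_equiv track=rewrite | github.com/andreubp/good_correlated | modules/clustalw.py | transpose_alignment
-- ===== SOURCE A (Python) =====
-- def transpose_alignment(align):
-- 	"""
-- 	From a MSA, transpose all columns and rows, such that the columns in the alignment are saved as elements in a list. So
-- 	finally we have a list of columns as strings.
-- 	"""
-- 	index = range(len(align[0]))
-- 	transposed_gap = list()
-- 	transposed = list()
-- 	for i in index:
-- 		transposed.append(''.join([seq[i] for seq in align]))
-- 	for column in transposed:
-- 		gap = 0
-- 		if column[0] != "-":
-- 			transposed_gap.append(column)
-- 	return transposed_gap
-- ===== SOURCE B (Python) =====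
-- def transpose_alignment(align):
--     """Row-wise accumulation: pick the kept column indices from align[0] first,
--     then sweep the rows once, appending each row's characters to per-column
--     buffers. Rejected columns are never materialised."""
--     keep = [i for i, c in enumerate(align[0]) if c != '-']
--     cols = [[] for _ in keep]
--     for seq in align:
--         for buf, i in zip(cols, keep):
--             buf.append(seq[i])
--     return [''.join(buf) for buf in cols]
-- ===== Notes on version B (the rewrite author's own statement) =====
-- stated objective: alternative
-- what changed: Instead of building every column by index and then filtering in a second loop, B precomputes the kept indices from align[0] and traverses the alignment row by row, growing per-column buffers, so gap-leading columns are never constructed.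
import Mathlib
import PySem

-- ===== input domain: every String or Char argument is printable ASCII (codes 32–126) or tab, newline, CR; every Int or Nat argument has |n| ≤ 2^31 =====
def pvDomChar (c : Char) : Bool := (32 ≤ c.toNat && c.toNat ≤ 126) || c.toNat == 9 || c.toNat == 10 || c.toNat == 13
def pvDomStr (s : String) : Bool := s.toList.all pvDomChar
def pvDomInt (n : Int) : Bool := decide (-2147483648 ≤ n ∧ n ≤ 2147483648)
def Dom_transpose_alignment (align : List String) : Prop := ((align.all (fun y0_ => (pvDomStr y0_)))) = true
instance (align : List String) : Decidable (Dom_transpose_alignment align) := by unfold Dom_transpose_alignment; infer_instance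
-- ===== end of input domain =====

-- B replaces A's build-all-columns-then-filter structure by a row-wise sweep: the kept
-- indices are computed from align[0] first and per-column buffers grow as the rows are
-- traversed; an alternative decomposition of the same cost.


-- ===== PORT A =====
-- literal port: build every column by index over range(len(align[0])), then filter.
def pyA_transposed (align : List String) : List String :=
  (PySem.List.pyRange 0 (PySem.Str.len (align.headD "")) 1).foldl (fun acc i =>
    acc ++ [String.ofList (align.map (fun seq => (PySem.Str.pyGet? seq i).getD ' '))]) []

def transpose_alignment (align : List String) : List String :=
  (pyA_transposed align).foldl (fun tg column =>
    if ((PySem.Str.pyGet? column 0).getD ' ' != '-') then tg ++ [column] else tg) []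

-- ===== PORT B =====
-- keep = [i for i, c in enumerate(align[0]) if c != '-']
-- cols = [[] for _ in keep]; for seq in align: for buf, i in zip(cols, keep): buf.append(seq[i])
def transpose_alignment_alt (align : List String) : List String :=
  let keep : List Int :=
    ((PySem.List.enumerate (align.headD "").toList 0).filter (fun p => p.2 != '-')).map
      (fun p => p.1)
  let cols0 : List (List Char) := keep.map (fun _ => ([] : List Char))
  let cols := align.foldl (fun cs seq =>
      List.zipWith (fun buf i => buf ++ [(PySem.Str.pyGet? seq i).getD ' ']) cs keep) cols0
  cols.map String.ofList

-- ===== PRECONDITION & SPEC =====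
-- Pre_ excludes exactly the inputs where A raises IndexError: empty align (align[0])
-- and alignments where some sequence is shorter than the first (seq[i]).
def Pre_transpose_alignment (align : List String) : Prop :=
  align ≠ [] ∧ ∀ s ∈ align, (align.headD "").toList.length ≤ s.toList.length
instance (align : List String) : Decidable (Pre_transpose_alignment align) := by
  unfold Pre_transpose_alignment; infer_instance
def pvWitness_transpose_alignment : List String := ["a-c", "-bc", "xyz"]

def Spec_transpose_alignment (align : List String) (out : List String) : Prop :=
  out = transpose_alignment_alt align
instance (align : List String) (out : List String) : Decidable (Spec_transpose_alignment align out) := by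
  unfold Spec_transpose_alignment; infer_instance

-- ===== CLAIM =====
def Claim_equal_transpose_alignment : Prop := ∀ (align : List String),
  Dom_transpose_alignment align → Pre_transpose_alignment align →
  Spec_transpose_alignment align (transpose_alignment align)

-- ===== LEMMAS AND PROOFS =====

-- zipWith against the pointwise image of the same list is a map.
theorem zipWith_map_left_self {α β : Type} (f : α → β → α) (F : β → α) :
    ∀ (l : List β), List.zipWith f (l.map F) l = l.map (fun i => f (F i) i) := by
  intro l; induction l with
  | nil => rfl
  | cons x xs ih => simp [ih]

-- Row-wise accumulation over per-index buffers collects, per index, that index's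
-- character of every row.
theorem foldl_rows_zipWith (g : String → Int → Char) (keep : List Int) :
    ∀ (rows : List String) (F : Int → List Char),
      rows.foldl (fun cs seq =>
          List.zipWith (fun buf i => buf ++ [g seq i]) cs keep) (keep.map F)
        = keep.map (fun i => F i ++ rows.map (fun seq => g seq i)) := by
  intro rows; induction rows with
  | nil => intro F; simp
  | cons r rs ih =>
    intro F
    rw [List.foldl_cons, zipWith_map_left_self (fun buf i => buf ++ [g r i]) F keep,
        ih (fun i => F i ++ [g r i])]
    simp

theorem filter_map_comm {α β : Type} (f : α → β) (p : β → Bool) (l : List α) :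
    (l.map f).filter p = (l.filter (fun x => p (f x))).map f := by
  induction l with
  | nil => rfl
  | cons x xs ih => by_cases h : p (f x) <;> simp [h, ih]

-- ===== VERDICT =====
theorem transpose_alignment_spec : Claim_equal_transpose_alignment := by
  intro align _hdom hpre
  cases align with
  | nil => exact absurd rfl hpre.1
  | cons s rest =>
    unfold Spec_transpose_alignment transpose_alignment transpose_alignment_alt pyA_transposed
    rw [PySem.List.foldl_append_singleton_eq_map,
        PySem.List.foldl_append_ite_eq_filter, List.nil_append, List.nil_append]
    simp only [List.headD_cons]
    -- A's side: filter of a map = map of a filter on the indices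
    rw [filter_map_comm]
    -- B's side: the fold collects, per kept index, the column characters
    rw [PySem.List.enumerate_eq_map_pyRange s.toList ' ', filter_map_comm]
    simp only [List.map_map, Function.comp_def, List.map_id']
    rw [foldl_rows_zipWith (fun seq i => (PySem.Str.pyGet? seq i).getD ' ') _ (s :: rest)
          (fun _ => [])]
    rw [List.map_map]
    simp only [Function.comp_def, List.nil_append, PySem.Str.len_eq, PySem.List.len_eq]
    refine congrArg _ (List.filter_congr ?_)
    intro i hi
    have hmem := (PySem.List.mem_pyRange_one).1 hi
    have h0 : 0 ≤ i := hmem.1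
    have h1 : i < (s.toList.length : Int) := by
      have h := hmem.2
      simpa using h
    have h1n : i.toNat < s.toList.length := by omega
    have hfirst : PySem.Str.pyGet? (String.ofList
        ((s :: rest).map (fun seq => (PySem.Str.pyGet? seq i).getD ' '))) 0
        = some ((PySem.Str.pyGet? s i).getD ' ') := by
      unfold PySem.Str.pyGet?
      simp [PySem.List.pyGet?_zero_cons]
    have hA : PySem.Str.pyGet? s i = some (s.toList[i.toNat]'h1n) := by
      unfold PySem.Str.pyGet?
      exact PySem.List.pyGet?_eq_some_getElem s.toList h0 h1
    have hB : PySem.List.pyGetD s.toList i ' ' = s.toList[i.toNat]'h1n :=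
      PySem.List.pyGetD_eq_getElem s.toList ' ' h0 h1
    rw [hfirst, hA, hB]
    by_cases hc : s.toList[i.toNat]'h1n = '-' <;> simp [hc]
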